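-- pv_equiv track=rewrite | github.com/harry7557558/spirulae-splat | scripts/plot_benchmark_results.py | transpose_table
-- ===== SOURCE A (Python) =====
-- from typing import Dict, Iterable, List, Optional, Sequence, Tuple
--
-- def transpose_table(headers: List[str], rows: List[List[str]]) -> Tuple[List[str], List[List[str]]]:
--     """
--     Transpose a ragged table safely.
--     """
--     width = max([len(headers)] + [len(r) for r in rows]) if rows else len(headers)
--     padded = [headers + [""] * max(0, width - len(headers))]
--     for r in rows:
--         padded.append(r + [""] * max(0, width - len(r)))
--
--     transposed = list(map(list, zip(*padded)))
--     new_headers = transposed[0]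
--     new_rows = transposed[1:]
--     return new_headers, new_rows
-- ===== SOURCE B (Python) =====
-- def transpose_table(headers, rows):
--     # Incremental sparse transpose: one pass over [headers]+rows touching only the
--     # entries each row actually has; blanks for skipped rows are back-filled lazily
--     # and every column is padded to full height at the end. No width precompute,
--     # no padded copy of the table, no zip.
--     cols = []
--     k = 0
--     for row in [headers] + rows:
--         for j in range(len(row)):
--             if j < len(cols):
--                 c = cols[j]
--                 if len(c) < k:
--                     c.extend([""] * (k - len(c)))
--                 c.append(row[j])
--             else:
--                 cols.append([""] * k + [row[j]])
--         k += 1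
--     for c in cols:
--         if len(c) < k:
--             c.extend([""] * (k - len(c)))
--     return cols[0], cols[1:]
-- ===== Notes on version B (the rewrite author's own statement) =====
-- stated objective: alternative
-- what changed: B performs an incremental sparse transpose: a single pass over [headers]+rows touches only the entries each row actually has, back-fills the blanks a column is owed lazily when its next value arrives, and pads every column to full height once at the end, instead of A's precompute-width / pad-every-row / zip(*) staging.
import Mathlib
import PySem

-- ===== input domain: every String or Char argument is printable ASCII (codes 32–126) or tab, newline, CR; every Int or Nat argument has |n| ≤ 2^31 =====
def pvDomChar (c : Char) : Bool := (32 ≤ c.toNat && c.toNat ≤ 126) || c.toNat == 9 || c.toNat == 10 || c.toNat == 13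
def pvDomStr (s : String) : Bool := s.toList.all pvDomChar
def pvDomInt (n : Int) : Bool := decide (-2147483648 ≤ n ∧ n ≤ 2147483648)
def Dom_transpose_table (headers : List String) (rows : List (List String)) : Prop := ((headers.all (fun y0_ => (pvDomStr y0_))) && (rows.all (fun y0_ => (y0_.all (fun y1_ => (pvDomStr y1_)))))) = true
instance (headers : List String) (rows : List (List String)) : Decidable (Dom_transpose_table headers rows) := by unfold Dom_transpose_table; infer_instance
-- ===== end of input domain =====

-- B transposes incrementally in one pass, touching only the entries each row actually has and back-filling blanks lazily, instead of A's width/pad-every-row/zip staging; different algorithm, not claimed faster.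


-- ===== PORT A =====

-- termination measure for pyZipStar (cited by name in decreasing_by)
theorem sum_tails_le (t : List (List String)) :
    ((t.map List.tail).map List.length).sum ≤ (t.map List.length).sum := by
  induction t with
  | nil => simp
  | cons b u ihu =>
    simp only [List.map_cons, List.sum_cons]
    have : b.tail.length ≤ b.length := by cases b <;> simp
    omega

theorem pyZipStar_dec (ls : List (List String)) (h1 : ¬ ls = []) (h2 : ¬ ls.any List.isEmpty = true) :
    ((ls.map List.tail).map List.length).sum < (ls.map List.length).sum := by
  induction ls with
  | nil => exact absurd rfl h1
  | cons a t ih =>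
    simp only [List.any_cons, Bool.or_eq_true, not_or] at h2
    have ha : a.tail.length < a.length := by
      cases a with
      | nil => simp at h2
      | cons x xs => simp
    have ht : ((t.map List.tail).map List.length).sum ≤ (t.map List.length).sum :=
      sum_tails_le t
    simp only [List.map_cons, List.sum_cons]
    omega

-- Python's zip(*padded): yield the heads of all the lists while every list is nonempty
def pyZipStar (ls : List (List String)) : List (List String) :=
  if h : ls = [] ∨ ls.any List.isEmpty then []
  else (ls.map List.headI) :: pyZipStar (ls.map List.tail)
termination_by (ls.map List.length).sum
decreasing_by
  simpa using pyZipStar_dec ls (not_or.mp h).1 (not_or.mp h).2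

-- literal port of A; widths/lengths are Nats (all the Python ints here are nonneg), Nat '-' matches
-- Python's 'max(0, width - len)'. 'transposed[0]'/'transposed[1:]' are headI/tail: exact under
-- Pre_transpose_table, which excludes exactly the width-0 inputs where Python raises IndexError.
def transpose_table (headers : List String) (rows : List (List String)) : List String × List (List String) :=
  let width := if rows = [] then headers.length else (rows.map List.length).foldl max headers.length
  let padded := rows.foldl (fun acc r => acc ++ [r ++ List.replicate (width - r.length) ""])
                  [headers ++ List.replicate (width - headers.length) ""]
  let transposed := pyZipStar padded
  (transposed.headI, transposed.tail)

-- ===== PORT B =====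
-- literal port of Source B: one pass over headers :: rows touching only the entries each row has;
-- a column is back-filled with "" up to height k only when a new value arrives, and every
-- column is padded to full height after the loop.
def pvColUpd (k : Nat) (c : List String) (x : String) : List String :=
  (if c.length < k then c ++ List.replicate (k - c.length) "" else c) ++ [x]

def pvRowStep (k : Nat) (cols : List (List String)) (row : List String) : List (List String) :=
  (List.range row.length).foldl (fun cols j =>
    if j < cols.length then cols.set j (pvColUpd k (cols.getD j []) (row.getD j ""))
    else cols ++ [List.replicate k "" ++ [row.getD j ""]]) cols

def transpose_table_alt (headers : List String) (rows : List (List String)) : List String × List (List String) :=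
  let st := (headers :: rows).foldl (fun (st : List (List String) × Nat) row => (pvRowStep st.2 st.1 row, st.2 + 1)) ([], 0)
  let cols := st.1.map (fun c => if c.length < st.2 then c ++ List.replicate (st.2 - c.length) "" else c)
  (cols.headI, cols.tail)

-- ===== PRECONDITION & SPEC =====
-- Pre_ excludes exactly the inputs where the table's width is 0: there both Pythons raise IndexError on cols[0]/transposed[0].
def Pre_transpose_table (headers : List String) (rows : List (List String)) : Prop :=
  0 < headers.length ∨ ∃ r ∈ rows, 0 < r.length
instance (headers : List String) (rows : List (List String)) : Decidable (Pre_transpose_table headers rows) := by unfold Pre_transpose_table; infer_instance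
def pvWitness_transpose_table : List String × List (List String) := (["a", "b"], [["x"], ["y", "z", "w"]])

def Spec_transpose_table (headers : List String) (rows : List (List String)) (out : List String × List (List String)) : Prop := out = transpose_table_alt headers rows
instance (headers : List String) (rows : List (List String)) (out : List String × List (List String)) : Decidable (Spec_transpose_table headers rows out) := by unfold Spec_transpose_table; infer_instance

-- ===== CLAIM (what is proved, stated in full; the proofs are below) =====
def Claim_equal_transpose_table : Prop := ∀ (headers : List String) (rows : List (List String)), Dom_transpose_table headers rows → Pre_transpose_table headers rows → Spec_transpose_table headers rows (transpose_table headers rows)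

-- ===== LEMMAS AND PROOFS =====

-- the common reference: entry j of row r as both programs read it
def pvPick (j : Nat) (r : List String) : String := if j < r.length then r.getD j "" else ""

def pvW (p : List (List String)) : Nat := (p.map List.length).foldl max 0
def pvCols (p : List (List String)) : List (List String) :=
  (List.range (pvW p)).map (fun j => p.map (pvPick j))

theorem le_foldl_max (a : Nat) (l : List Nat) : a ≤ l.foldl max a := by
  induction l generalizing a with
  | nil => simp
  | cons b t ih => exact le_trans (Nat.le_max_left a b) (ih (max a b))

theorem mem_le_foldl_max (a : Nat) {l : List Nat} {x : Nat} (hx : x ∈ l) : x ≤ l.foldl max a := by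
  induction l generalizing a with
  | nil => simp at hx
  | cons b t ih =>
    rcases List.mem_cons.mp hx with h | h
    · subst h; exact le_trans (Nat.le_max_right a x) (le_foldl_max _ t)
    · exact ih _ h

theorem tail_getD (l : List String) (j : Nat) : l.tail.getD j "" = l.getD (j + 1) "" := by
  cases l <;> simp [List.getD]

theorem pad_getD (row : List String) (k j : Nat) :
    (row ++ List.replicate k "").getD j "" = pvPick j row := by
  unfold pvPick
  induction row generalizing j with
  | nil =>
    simp only [List.nil_append, List.length_nil]
    induction k generalizing j with
    | zero => simp [List.getD]
    | succ k ih =>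
      cases j with
      | zero => simp [List.replicate_succ, List.getD]
      | succ n => simp [List.replicate_succ, List.getD]
  | cons a t ih =>
    cases j with
    | zero => simp [List.getD]
    | succ n => simpa [List.getD] using ih n

theorem zipStar_eq (w : Nat) : ∀ (ls : List (List String)), ls ≠ [] → (∀ l ∈ ls, l.length = w) →
    pyZipStar ls = (List.range w).map (fun j => ls.map (fun l => l.getD j "")) := by
  induction w with
  | zero =>
    intro ls h1 h2
    rw [pyZipStar.eq_def]
    have : ls.any List.isEmpty = true := by
      cases ls with
      | nil => exact absurd rfl h1
      | cons a t =>
        have : a = [] := List.length_eq_zero_iff.mp (h2 a (List.mem_cons_self ..))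
        simp [this]
    simp [this]
  | succ w ih =>
    intro ls h1 h2
    rw [pyZipStar.eq_def]
    have hno : ls.any List.isEmpty = false := by
      rw [List.any_eq_false]
      intro l hl
      have hlen := h2 l hl
      cases l with
      | nil => simp at hlen
      | cons a t => simp
    rw [dif_neg (by simp [h1, hno])]
    have htl : pyZipStar (ls.map List.tail) =
        (List.range w).map (fun j => (ls.map List.tail).map (fun l => l.getD j "")) := by
      apply ih
      · simpa using h1
      · intro l hl
        rcases List.mem_map.mp hl with ⟨l', hl', rfl⟩
        have hlen := h2 l' hl'
        cases l' with
        | nil => simp at hlen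
        | cons a t =>
          simp only [List.length_cons] at hlen
          simpa using Nat.succ_injective hlen
    rw [htl, List.range_succ_eq_map, List.map_cons]
    congr 1
    · apply List.map_congr_left
      intro l hl
      have hlen := h2 l hl
      cases l with
      | nil => simp at hlen
      | cons a t => simp [List.getD]
    · rw [List.map_map]
      apply List.map_congr_left
      intro j _
      simp only [Function.comp, List.map_map]
      apply List.map_congr_left
      intro l _
      exact tail_getD l j

theorem foldl_append_snoc {α β : Type} (f : α → β) (rows : List α) (init : List β) :
    rows.foldl (fun acc r => acc ++ [f r]) init = init ++ rows.map f := by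
  induction rows generalizing init with
  | nil => simp
  | cons r t ih => simp [ih, List.append_assoc]

-- A's width expression equals pvW of the whole sequence
theorem widthA_eq (headers : List String) (rows : List (List String)) :
    (if rows = [] then headers.length else (rows.map List.length).foldl max headers.length)
      = pvW (headers :: rows) := by
  unfold pvW
  by_cases hr : rows = [] <;> simp [hr]

-- A computes pvCols of headers :: rows
theorem A_eq_cols (headers : List String) (rows : List (List String)) :
    transpose_table headers rows = ((pvCols (headers :: rows)).headI, (pvCols (headers :: rows)).tail) := by
  unfold transpose_table
  simp only []
  rw [widthA_eq]
  set width := pvW (headers :: rows) with hw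
  have hwide : ∀ l ∈ headers :: rows, l.length ≤ width := by
    intro l hl
    exact mem_le_foldl_max 0 (List.mem_map_of_mem hl)
  have hpad : rows.foldl (fun acc r => acc ++ [r ++ List.replicate (width - r.length) ""])
        [headers ++ List.replicate (width - headers.length) ""]
      = (headers :: rows).map (fun r => r ++ List.replicate (width - r.length) "") := by
    rw [foldl_append_snoc (fun r => r ++ List.replicate (width - r.length) "")]
    simp
  rw [hpad]
  have hzip := zipStar_eq width ((headers :: rows).map (fun r => r ++ List.replicate (width - r.length) ""))
    (by simp) (by
      intro l hl
      rcases List.mem_map.mp hl with ⟨r, hr, rfl⟩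
      have := hwide r hr
      simp [List.length_append, List.length_replicate]
      omega)
  rw [hzip]
  unfold pvCols
  rw [← hw]
  congr 2 <;>
  · apply List.map_congr_left
    intro j _
    rw [List.map_map]
    apply List.map_congr_left
    intro r _
    exact pad_getD r _ j

-- columns whose index exceeds every row's length are all blanks
theorem map_pick_replicate (p : List (List String)) (j : Nat)
    (h : ∀ r ∈ p, r.length ≤ j) : p.map (pvPick j) = List.replicate p.length "" := by
  rw [List.eq_replicate_iff]
  refine ⟨by simp, ?_⟩
  intro b hb
  rcases List.mem_map.mp hb with ⟨r, hr, rfl⟩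
  have := h r hr
  simp [pvPick]
  omega

theorem W_snoc (p : List (List String)) (row : List String) :
    pvW (p ++ [row]) = max (pvW p) row.length := by
  unfold pvW
  rw [List.map_append, List.foldl_append]
  simp

-- the invariant of B's outer loop: cols holds one list per column of p, each being the true
-- column with some all-blank suffix still missing
def pvInv (p : List (List String)) (cols : List (List String)) : Prop :=
  cols.length = pvW p ∧ ∀ j, j < pvW p →
    (cols.getD j []).length ≤ p.length ∧
    cols.getD j [] ++ List.replicate (p.length - (cols.getD j []).length) "" = p.map (pvPick j)

theorem getD_set_self (cols : List (List String)) (j : Nat) (v : List String) (h : j < cols.length) :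
    (cols.set j v).getD j [] = v := by
  simp [List.getD, h]

theorem getD_set_ne (cols : List (List String)) (j i : Nat) (v : List String) (h : i ≠ j) :
    (cols.set j v).getD i [] = cols.getD i [] := by
  simp [List.getD, List.getElem?_set_ne (Ne.symm h)]

theorem getD_append_lt (cols : List (List String)) (v : List String) (i : Nat) (h : i < cols.length) :
    (cols ++ [v]).getD i [] = cols.getD i [] := by
  simp [List.getD, List.getElem?_append_left h]

theorem getD_append_self (cols : List (List String)) (v : List String) :
    (cols ++ [v]).getD cols.length [] = v := by
  simp [List.getD]

theorem getD_append_gt (cols : List (List String)) (v : List String) (i : Nat) (h : cols.length < i) :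
    (cols ++ [v]).getD i [] = cols.getD i [] := by
  have h1 : (cols ++ [v]).length ≤ i := by simp; omega
  have h2 : cols.length ≤ i := by omega
  simp [List.getD, List.getElem?_eq_none h1, List.getElem?_eq_none h2]

-- B's inner loop over range' j0 m: columns j0 ≤ i < j0+m get pvColUpd applied, others are untouched
theorem inner_inv (k : Nat) (row : List String) :
    ∀ (m j0 : Nat) (cols : List (List String)), j0 ≤ cols.length →
    (let r := (List.range' j0 m).foldl (fun cols j =>
        if j < cols.length then cols.set j (pvColUpd k (cols.getD j []) (row.getD j ""))
        else cols ++ [List.replicate k "" ++ [row.getD j ""]]) cols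
     r.length = max cols.length (j0 + m) ∧
     (∀ i, i < j0 ∨ j0 + m ≤ i → r.getD i [] = cols.getD i []) ∧
     (∀ i, j0 ≤ i → i < j0 + m → r.getD i [] = pvColUpd k (cols.getD i []) (row.getD i ""))) := by
  intro m
  induction m with
  | zero =>
    intro j0 cols hle
    refine ⟨by simp; omega, fun i _ => rfl, fun i h1 h2 => by omega⟩
  | succ m ih =>
    intro j0 cols hle
    rw [List.range'_succ, List.foldl_cons]
    set cols1 := if j0 < cols.length then cols.set j0 (pvColUpd k (cols.getD j0 []) (row.getD j0 ""))
        else cols ++ [List.replicate k "" ++ [row.getD j0 ""]] with hc1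
    have hlen1 : cols1.length = max cols.length (j0 + 1) := by
      rw [hc1]; split_ifs with h <;> simp <;> omega
    have hj0self : cols1.getD j0 [] = pvColUpd k (cols.getD j0 []) (row.getD j0 "") := by
      rw [hc1]; split_ifs with h
      · exact getD_set_self cols j0 _ h
      · have hj : j0 = cols.length := by omega
        subst hj
        rw [getD_append_self]
        have : cols.getD cols.length [] = [] := by
          simp [List.getD]
        rw [this]
        unfold pvColUpd
        cases k <;> simp
    have hne : ∀ i, i ≠ j0 → cols1.getD i [] = cols.getD i [] := by
      intro i hi
      rw [hc1]; split_ifs with h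
      · exact getD_set_ne cols j0 i _ hi
      · have hj : j0 = cols.length := by omega
        rcases Nat.lt_or_ge i cols.length with h2 | h2
        · exact getD_append_lt cols _ i h2
        · have : cols.length < i := by omega
          exact getD_append_gt cols _ i this
    have hle1 : j0 + 1 ≤ cols1.length := by omega
    obtain ⟨ihlen, ihout, ihin⟩ := ih (j0 + 1) cols1 hle1
    refine ⟨?_, ?_, ?_⟩
    · rw [ihlen, hlen1]; omega
    · intro i hi
      have h1 : i < j0 + 1 ∨ j0 + 1 + m ≤ i := by omega
      rw [ihout i h1]
      exact hne i (by omega)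
    · intro i h1 h2
      rcases Nat.eq_or_lt_of_le h1 with heq | hlt
      · subst heq
        rw [ihout j0 (Or.inl (by omega)), hj0self]
      · rw [ihin i (by omega) (by omega), hne i (by omega)]

-- one step of B's outer loop preserves the invariant
theorem rowStep_inv (p : List (List String)) (row : List String) (cols : List (List String))
    (hinv : pvInv p cols) : pvInv (p ++ [row]) (pvRowStep p.length cols row) := by
  obtain ⟨hlen, hcol⟩ := hinv
  unfold pvRowStep
  rw [List.range_eq_range']
  obtain ⟨rlen, rout, rin⟩ := inner_inv p.length row row.length 0 cols (by omega)
  constructor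
  · rw [rlen, hlen, W_snoc]; omega
  · intro j hj
    rw [W_snoc] at hj
    have hbound : ∀ r ∈ p, r.length ≤ pvW p := fun r hr => mem_le_foldl_max 0 (List.mem_map_of_mem hr)
    rcases Nat.lt_or_ge j row.length with hjr | hjr
    · -- this row writes column j: it becomes the full column of p ++ [row]
      rw [rin j (by omega) (by simpa using hjr)]
      have hpick : pvPick j row = row.getD j "" := by simp [pvPick, hjr]
      rcases Nat.lt_or_ge j (pvW p) with hjw | hjw
      · obtain ⟨hl, he⟩ := hcol j hjw
        have hpad : (if (cols.getD j []).length < p.length then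
              cols.getD j [] ++ List.replicate (p.length - (cols.getD j []).length) "" else cols.getD j [])
            = p.map (pvPick j) := by
          split_ifs with h
          · exact he
          · have h0 : p.length - (cols.getD j []).length = 0 := by omega
            rw [← he, h0]; simp
        unfold pvColUpd
        rw [hpad]
        constructor
        · simp only [List.length_append, List.length_map, List.length_cons, List.length_nil]
          omega
        · simp [hpick]
      · -- a brand-new column: cols.getD is the default []
        have hout : cols.getD j [] = [] := by
          have : cols.length ≤ j := by omega
          simp [List.getD, List.getElem?_eq_none this]
        rw [hout]
        have hfull : pvColUpd p.length [] (row.getD j "") = p.map (pvPick j) ++ [row.getD j ""] := by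
          unfold pvColUpd
          rw [map_pick_replicate p j (fun r hr => le_trans (hbound r hr) hjw)]
          cases p <;> simp
        rw [hfull]
        constructor
        · simp only [List.length_append, List.length_map, List.length_cons, List.length_nil]
          omega
        · simp [hpick]
    · -- row does not reach column j: untouched, one more blank owed
      have hjw : j < pvW p := by omega
      rw [rout j (by omega)]
      obtain ⟨hl, he⟩ := hcol j hjw
      have hpick : pvPick j row = "" := by simp [pvPick]; omega
      have hlen2 : (p ++ [row]).length = p.length + 1 := by simp
      constructor
      · rw [hlen2]; omega
      · have hsub : p.length + 1 - (cols.getD j []).length = (p.length - (cols.getD j []).length) + 1 := by omega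
        rw [hlen2, hsub, List.replicate_succ',
          ← List.append_assoc, he, List.map_append]
        simp [hpick]

-- B's outer fold threads the invariant through the whole sequence
theorem fold_inv (seq : List (List String)) : ∀ (p : List (List String)) (cols : List (List String)),
    pvInv p cols →
    (let st := seq.foldl (fun (st : List (List String) × Nat) row => (pvRowStep st.2 st.1 row, st.2 + 1)) (cols, p.length)
     pvInv (p ++ seq) st.1 ∧ st.2 = (p ++ seq).length) := by
  induction seq with
  | nil => intro p cols h; exact ⟨by simpa using h, by simp⟩
  | cons row t ih =>
    intro p cols h
    simp only [List.foldl_cons]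
    have h1 := rowStep_inv p row cols h
    have h2 := ih (p ++ [row]) (pvRowStep p.length cols row) h1
    constructor
    · have := h2.1
      simpa [List.append_assoc] using this
    · have := h2.2
      simp at this ⊢
      omega

-- the final padding turns the invariant's columns into the exact transpose
theorem final_pad (seq : List (List String)) (cols : List (List String)) (hinv : pvInv seq cols) :
    cols.map (fun c => if c.length < seq.length then c ++ List.replicate (seq.length - c.length) "" else c)
      = pvCols seq := by
  obtain ⟨hlen, hcol⟩ := hinv
  apply List.ext_getElem
  · simp [pvCols, hlen]
  · intro j h1 h2
    have hj : j < pvW seq := by simpa [pvCols] using h2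
    obtain ⟨hl, he⟩ := hcol j hj
    have hgd : cols.getD j [] = cols[j] := by
      rw [List.getD_eq_getElem?_getD, List.getElem?_eq_getElem (by omega), Option.getD_some]
    rw [hgd] at hl he
    have hcols : (pvCols seq)[j] = seq.map (pvPick j) := by
      simp [pvCols]
    rw [List.getElem_map, hcols]
    split_ifs with h
    · exact he
    · have h0 : seq.length - cols[j].length = 0 := by omega
      rw [← he, h0]; simp

theorem B_eq_cols (headers : List String) (rows : List (List String)) :
    transpose_table_alt headers rows = ((pvCols (headers :: rows)).headI, (pvCols (headers :: rows)).tail) := by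
  unfold transpose_table_alt
  have h0 : pvInv [] [] := by
    constructor
    · simp [pvW]
    · intro j hj; simp [pvW] at hj
  obtain ⟨hinv, hk⟩ := fold_inv (headers :: rows) [] [] h0
  simp only [List.nil_append, List.length_nil] at hinv hk
  simp only []
  rw [hk, final_pad (headers :: rows) _ hinv]

-- ===== VERDICT (by name: the statement is the Claim_ definition above) =====
theorem transpose_table_spec : Claim_equal_transpose_table := by
  intro headers rows _ _
  unfold Spec_transpose_table
  rw [A_eq_cols, B_eq_cols]
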